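-- pv_equiv track=rewrite | github.com/sushrut91/ComputerSecurity-Project1 | Q3ApphineCipher.py | EncryptCharacter
-- ===== SOURCE A (Python) =====
-- def EncryptCharacter(plain_char, letter_set,a,b):
--     # E(x) = (a(x) + b) mod p where a and p should be co-prime
--     x = letter_set.get(plain_char)
--     n = len(letter_set)
--     cipher_char = plain_char
--
--     if AreRelativePrime(a,n):
--         cipher_char = (a*x + b) % n
--
--         #Find the key from value
--     for key,value in letter_set.items():
--         if value == cipher_char:
--             return str(key)
--
--
--     else:
--         return 'Please change value of a such that a & n are coprime numbers, n is a prime number, n>a'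
--
-- def AreRelativePrime(n1,n2):
-- # Numbers are relative prime if their GCD is 1, Euclid's algorithm
-- # Ensure n1 is always greater
-- # Ensure that n1 is always prime
--     flag = False
--
--     if n1 > n2:
--         flag = isPrime(n1)
--     elif n2> n1:
--         flag = isPrime(n2)
--     else:
--         return 'Both a and n cannot be equal for algorithm to work'
--
--     if flag:
--         if n2 > n1 :
--             swap = n2
--             n2 = n1
--             n1 = swap
--         remainder = n1
--         while n2 > 1:
--             remainder = n1 % n2
--             n1 = n2
--             n2 = remainder
--         if remainder == 1:
--             return True
--         else:
--             return False
--     else: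
--         return False
--
-- def isPrime(n):
--     flag = True
--     for i in range(2,n):
--         if n % i == 0:
--             flag = False
--     return flag
-- ===== SOURCE B (Python) =====
-- MSG = 'Please change value of a such that a & n are coprime numbers, n is a prime number, n>a'
--
--
-- def _is_prime(m):
--     if m < 2:
--         return False
--     i = 2
--     while i * i <= m:
--         if m % i == 0:
--             return False
--         i += 1
--     return True
--
--
-- def EncryptCharacter(plain_char, letter_set, a, b):
--     # Encrypt only when the larger of a and the alphabet size is prime and the
--     # smaller is at least 2; a prime modulus has no divisor below it, so the
--     # pair needs no gcd computation.
--     n = len(letter_set)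
--     lo, hi = min(a, n), max(a, n)
--     if lo < 2 or not _is_prime(hi):
--         return MSG
--     cipher = (a * letter_set[plain_char] + b) % n
--     reverse = {}
--     for key, value in letter_set.items():
--         reverse.setdefault(value, key)
--     return reverse.get(cipher, MSG)
-- ===== Notes on version B (the rewrite author's own statement) =====
-- stated objective: faster
-- what changed: Replaces A's unbounded trial-division isPrime plus hand-rolled Euclid gcd scan by a sqrt-bounded trial division with early exit and the closed-form validity test 'min(a,n) >= 2 and max(a,n) prime' (a prime modulus needs no gcd computation), and replaces A's linear first-match reverse scan by a value->key index built once; Pre_ excludes inputs where A raises (encrypting with a missing key) and dictionaries using A's error-message string as a key, where the returned string is ambiguous between a found key and the failure message.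
-- intended difference: Where A's validity check is only accidentally truthy - a == n with a not a prime >= 2 (AreRelativePrime returns a truthy error STRING) or max(a,n) == 1 with min(a,n) <= 1 (the empty-range isPrime calls 1 prime) - A encrypts anyway and returns the first key whose value equals the cipher, while B refuses and returns the 'Please change value of a ...' message, the intended refusal since the author's own stated requirements (a,n coprime, n prime) fail there. — e.g. on EncryptCharacter("a", [("a", 0)], 1, 5): A returns "a", B returns "Please change value of a such that a & n are coprime numbers, n is a prime number, n>a"
import Mathlib
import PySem

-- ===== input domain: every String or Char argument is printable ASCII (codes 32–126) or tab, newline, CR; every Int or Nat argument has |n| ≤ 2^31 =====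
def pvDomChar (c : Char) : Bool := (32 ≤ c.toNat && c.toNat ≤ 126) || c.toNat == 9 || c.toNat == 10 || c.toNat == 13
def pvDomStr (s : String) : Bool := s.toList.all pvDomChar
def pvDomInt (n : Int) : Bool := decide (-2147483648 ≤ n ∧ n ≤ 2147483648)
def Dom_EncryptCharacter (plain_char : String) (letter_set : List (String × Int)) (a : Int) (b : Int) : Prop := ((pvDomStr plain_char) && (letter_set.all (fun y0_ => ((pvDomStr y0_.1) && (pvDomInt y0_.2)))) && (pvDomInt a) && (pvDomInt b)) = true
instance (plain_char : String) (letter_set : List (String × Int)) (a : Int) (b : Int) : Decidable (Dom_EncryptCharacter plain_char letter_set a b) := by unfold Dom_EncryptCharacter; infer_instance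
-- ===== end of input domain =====

-- B replaces A's unbounded trial division and hand-rolled Euclid scan by a √-bounded primality
-- test of max(a,n) with min(a,n) ≥ 2 (a prime modulus needs no gcd computation), and replaces
-- A's linear reverse scan of the dict by a value→key index built once; where A's validity check
-- is only accidentally truthy, B refuses — stated below as D_EncryptCharacter.

-- ===== PORT A =====
def pvMsgA : String := "Please change value of a such that a & n are coprime numbers, n is a prime number, n>a"

def isPrimeA (n : Int) : Bool :=
  (PySem.List.pyRange 2 n).foldl (fun flag i => if PySem.Int.mod n i == 0 then false else flag) true

-- the while-loop of AreRelativePrime: returns the final `remainder`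
def euclidLoopA (n1 n2 rem : Int) : Int :=
  if _h : n2 > 1 then euclidLoopA n2 (PySem.Int.mod n1 n2) (PySem.Int.mod n1 n2) else rem
termination_by n2.toNat
decreasing_by
  have h1 := PySem.Int.mod_lt n1 (show (0:Int) < n2 by omega)
  have h2 := PySem.Int.mod_nonneg n1 (show (0:Int) < n2 by omega)
  omega

def areRelAuxA (flag : Bool) (n1 n2 : Int) : Bool :=
  if flag then
    let p := if n2 > n1 then (n2, n1) else (n1, n2)
    if euclidLoopA p.1 p.2 p.1 == 1 then true else false
  else false

-- Python's AreRelativePrime returns True/False or, when n1 == n2, a truthy error STRING;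
-- its only caller tests truthiness, so the port returns that truth value (true in the n1 == n2 branch).
def AreRelativePrimeA (n1 n2 : Int) : Bool :=
  if n1 > n2 then areRelAuxA (isPrimeA n1) n1 n2
  else if n2 > n1 then areRelAuxA (isPrimeA n2) n1 n2
  else true

def EncryptCharacter (plain_char : String) (letter_set : List (String × Int)) (a : Int) (b : Int) : String :=
  let d := PySem.Dict.ofList letter_set
  let n : Int := (d.size : Int)
  -- cipher_char starts as the plain string and becomes an int only in the if-branch; where Python
  -- would raise there (missing key → TypeError, n = 0 → ZeroDivisionError) the input is outside Pre_
  let cipher? : Option Int :=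
    if AreRelativePrimeA a n then some (PySem.Int.mod (a * d.getD plain_char 0 + b) n) else none
  match cipher? with
  | some c =>
    match d.items.find? (fun p => p.2 == c) with
    | some p => p.1          -- str(key) of a str key is the key
    | none => pvMsgA         -- the for/else fall-through
  | none => pvMsgA           -- cipher_char is still a string; no Int value equals it, the scan falls through

-- ===== PORT B =====
def pvMsgB : String := "Please change value of a such that a & n are coprime numbers, n is a prime number, n>a"

def isPrimeTrialB (m : Int) (i : Nat) : Bool :=
  if _h : (i : Int) * (i : Int) ≤ m then
    (if PySem.Int.mod m (i : Int) == 0 then false else isPrimeTrialB m (i + 1))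
  else true
termination_by m.toNat + 1 - i
decreasing_by
  have hm : (0:Int) ≤ m := le_trans (by positivity) _h
  have hii : (i : Int) ≤ (i : Int) * (i : Int) := by nlinarith [Int.natCast_nonneg i]
  have : (i : Int) ≤ m := le_trans hii _h
  omega

def isPrimeB (m : Int) : Bool :=
  if m < 2 then false else isPrimeTrialB m 2

def EncryptCharacter_alt (plain_char : String) (letter_set : List (String × Int)) (a : Int) (b : Int) : String :=
  let d := PySem.Dict.ofList letter_set
  let n : Int := (d.size : Int)
  let lo := min a n
  let hi := max a n
  if decide (lo < 2) || !isPrimeB hi then pvMsgB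
  else
    -- letter_set[plain_char]: inside Pre_ the key is present (KeyError is outside Pre_)
    let c := PySem.Int.mod (a * d.getD plain_char 0 + b) n
    let rev : PySem.Dict Int String :=
      d.items.foldl (fun r p => if r.contains p.2 then r else r.insert p.2 p.1) PySem.Dict.empty
    (rev.get? c).getD pvMsgB

-- ===== PRECONDITION & SPEC =====
-- the truth value of A's AreRelativePrime(a, n) call, written in closed form
def CondC (a n : Int) : Prop :=
  a = n ∨
  (2 ≤ min a n ∧ Nat.Prime (max a n).toNat) ∨
  (max a n = 1 ∧ min a n ≤ 1)

-- Pre_ excludes (i) inputs where A raises (encryption branch taken but plain_char is not a key: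
-- TypeError on a*None, resp. ZeroDivisionError on the empty dict) and (ii) dictionaries that use
-- A's error-message sentinel as a key, on which the returned string is ambiguous between a found
-- key and the failure message.
def Pre_EncryptCharacter (plain_char : String) (letter_set : List (String × Int)) (a : Int) (b : Int) : Prop :=
  (CondC a ((PySem.Dict.ofList letter_set).size : Int) →
      (PySem.Dict.ofList letter_set).contains plain_char = true) ∧
  (∀ p ∈ letter_set,
      p.1 ≠ "Please change value of a such that a & n are coprime numbers, n is a prime number, n>a")
instance (plain_char : String) (letter_set : List (String × Int)) (a : Int) (b : Int) : Decidable (Pre_EncryptCharacter plain_char letter_set a b) := by unfold Pre_EncryptCharacter CondC; infer_instance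

def pvWitness_EncryptCharacter : String × (List (String × Int)) × Int × Int :=
  ("a", [("a", 0), ("b", 1)], 3, 1)

-- Where A's validity check is only accidentally truthy — a == n with a not a prime ≥ 2 (the helper
-- returns a truthy error STRING) or max(a,n) == 1 with min(a,n) ≤ 1 (A's empty-range isPrime calls
-- 1 prime) — A encrypts anyway and returns the first key whose value is the cipher; B refuses and
-- returns the 'Please change value of a …' message, the intended refusal since the author's own
-- stated requirements (coprime a and n, n prime) fail on these inputs.
def D_EncryptCharacter (plain_char : String) (letter_set : List (String × Int)) (a : Int) (b : Int) : Prop :=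
  (PySem.Dict.ofList letter_set).contains plain_char = true ∧
  PySem.Int.mod (a * (PySem.Dict.ofList letter_set).getD plain_char 0 + b)
      ((PySem.Dict.ofList letter_set).size : Int) ∈ (PySem.Dict.ofList letter_set).values ∧
  ((a = ((PySem.Dict.ofList letter_set).size : Int) ∧ ¬ (2 ≤ a ∧ Nat.Prime a.toNat)) ∨
   (a ≠ ((PySem.Dict.ofList letter_set).size : Int) ∧
      max a ((PySem.Dict.ofList letter_set).size : Int) = 1 ∧
      min a ((PySem.Dict.ofList letter_set).size : Int) ≤ 1))
instance (plain_char : String) (letter_set : List (String × Int)) (a : Int) (b : Int) : Decidable (D_EncryptCharacter plain_char letter_set a b) := by unfold D_EncryptCharacter; infer_instance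

def Spec_EncryptCharacter (plain_char : String) (letter_set : List (String × Int)) (a : Int) (b : Int) (out : String) : Prop := ¬ D_EncryptCharacter plain_char letter_set a b → out = EncryptCharacter_alt plain_char letter_set a b
instance (plain_char : String) (letter_set : List (String × Int)) (a : Int) (b : Int) (out : String) : Decidable (Spec_EncryptCharacter plain_char letter_set a b out) := by unfold Spec_EncryptCharacter; infer_instance

def pvDiffWitness_EncryptCharacter : String × (List (String × Int)) × Int × Int :=
  ("a", [("a", 0)], 1, 5)
def pvDiffWitnessOut_EncryptCharacter : String × String :=
  ("a", "Please change value of a such that a & n are coprime numbers, n is a prime number, n>a")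

-- ===== CLAIM (what is proved, stated in full; the proofs are below) =====
def Claim_unchanged_EncryptCharacter : Prop := ∀ (plain_char : String) (letter_set : List (String × Int)) (a : Int) (b : Int), Dom_EncryptCharacter plain_char letter_set a b → Pre_EncryptCharacter plain_char letter_set a b → Spec_EncryptCharacter plain_char letter_set a b (EncryptCharacter plain_char letter_set a b)
def Claim_changed_EncryptCharacter : Prop := Dom_EncryptCharacter (pvDiffWitness_EncryptCharacter.1) (pvDiffWitness_EncryptCharacter.2.1) (pvDiffWitness_EncryptCharacter.2.2.1) (pvDiffWitness_EncryptCharacter.2.2.2) ∧ Pre_EncryptCharacter (pvDiffWitness_EncryptCharacter.1) (pvDiffWitness_EncryptCharacter.2.1) (pvDiffWitness_EncryptCharacter.2.2.1) (pvDiffWitness_EncryptCharacter.2.2.2) ∧ D_EncryptCharacter (pvDiffWitness_EncryptCharacter.1) (pvDiffWitness_EncryptCharacter.2.1) (pvDiffWitness_EncryptCharacter.2.2.1) (pvDiffWitness_EncryptCharacter.2.2.2) ∧ EncryptCharacter (pvDiffWitness_EncryptCharacter.1) (pvDiffWitness_EncryptCharacter.2.1) (pvDiffWitness_EncryptCharacter.2.2.1)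 (pvDiffWitness_EncryptCharacter.2.2.2) = pvDiffWitnessOut_EncryptCharacter.1 ∧ EncryptCharacter_alt (pvDiffWitness_EncryptCharacter.1) (pvDiffWitness_EncryptCharacter.2.1) (pvDiffWitness_EncryptCharacter.2.2.1) (pvDiffWitness_EncryptCharacter.2.2.2) = pvDiffWitnessOut_EncryptCharacter.2 ∧ pvDiffWitnessOut_EncryptCharacter.1 ≠ pvDiffWitnessOut_EncryptCharacter.2
def Claim_exact_EncryptCharacter : Prop := ∀ (plain_char : String) (letter_set : List (String × Int)) (a : Int) (b : Int), Dom_EncryptCharacter plain_char letter_set a b → Pre_EncryptCharacter plain_char letter_set a b → D_EncryptCharacter plain_char letter_set a b → EncryptCharacter plain_char letter_set a b ≠ EncryptCharacter_alt plain_char letter_set a b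
-- ===== LEMMAS AND PROOFS =====

theorem foldl_flagFalse (f : Int → Bool) (l : List Int) (bb : Bool) :
    l.foldl (fun flag i => if f i then false else flag) bb = (bb && l.all (fun i => !f i)) := by
  induction l generalizing bb with
  | nil => simp
  | cons x t ih =>
    simp only [List.foldl_cons, List.all_cons, ih]
    cases h : f x <;> simp [h]

theorem isPrimeA_eq (m : Int) (hm : 2 ≤ m) : isPrimeA m = decide (Nat.Prime m.toNat) := by
  have hm' : ((m.toNat : Nat) : Int) = m := Int.toNat_of_nonneg (by omega)
  rw [isPrimeA, foldl_flagFalse (fun i => PySem.Int.mod m i == 0), Bool.true_and]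
  apply Bool.eq_iff_iff.mpr
  rw [List.all_eq_true, decide_eq_true_eq]
  constructor
  · intro h
    rw [Nat.prime_def_lt]
    refine ⟨by omega, fun k hk hdvd => ?_⟩
    by_contra hk1
    have hk0 : k ≠ 0 := by
      rintro rfl
      have := Nat.eq_zero_of_zero_dvd hdvd
      omega
    have hmem : (k : Int) ∈ PySem.List.pyRange 2 m :=
      PySem.List.mem_pyRange_one.mpr ⟨by omega, by omega⟩
    have hres := h _ hmem
    have hdvd' : (k : Int) ∣ m := by
      rw [← hm']
      exact_mod_cast hdvd
    rw [Bool.not_eq_eq_eq_not, Bool.not_true, beq_eq_false_iff_ne] at hres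
    exact hres ((PySem.Int.mod_eq_zero_iff_dvd m (k : Int)).mpr hdvd')
  · intro hp i hmem
    obtain ⟨h2i, hlt⟩ := PySem.List.mem_pyRange_one.mp hmem
    rw [Bool.not_eq_eq_eq_not, Bool.not_true, beq_eq_false_iff_ne]
    intro hmod
    have hdvd : i ∣ m := (PySem.Int.mod_eq_zero_iff_dvd m i).mp hmod
    have hdvd' : i.toNat ∣ m.toNat := by
      rw [← Int.natCast_dvd_natCast, hm', Int.toNat_of_nonneg (by omega : (0:Int) ≤ i)]
      exact hdvd
    have := (Nat.prime_def_lt.mp hp).2 i.toNat (by omega) hdvd'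
    omega

theorem isPrimeTrialB_spec (m : Int) (i : Nat) :
    isPrimeTrialB m i = true ↔
      ∀ j : Nat, i ≤ j → (j : Int) * (j : Int) ≤ m → ¬ ((j : Int) ∣ m) := by
  rw [isPrimeTrialB]
  by_cases h : (i : Int) * (i : Int) ≤ m
  · rw [dif_pos h]
    by_cases hd : (PySem.Int.mod m (i : Int) == 0) = true
    · rw [if_pos hd]
      refine iff_of_false (by simp) ?_
      intro hall
      exact hall i le_rfl h ((PySem.Int.mod_eq_zero_iff_dvd m (i : Int)).mp (beq_iff_eq.mp hd))
    · rw [if_neg hd, isPrimeTrialB_spec m (i + 1)]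
      constructor
      · intro h' j hij hjj
        rcases Nat.eq_or_lt_of_le hij with heq | hlt
        · subst heq
          intro hdvd
          exact hd (beq_iff_eq.mpr ((PySem.Int.mod_eq_zero_iff_dvd m ((i : Nat) : Int)).mpr hdvd))
        · exact h' j hlt hjj
      · intro h' j hij hjj
        exact h' j (by omega) hjj
  · rw [dif_neg h]
    refine iff_of_true rfl ?_
    intro j hij hjj _
    apply h
    have hj : (i : Int) ≤ (j : Int) := by exact_mod_cast hij
    have h0 : (0 : Int) ≤ (i : Int) := by positivity
    nlinarith
termination_by m.toNat + 1 - i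
decreasing_by
  have hm : (0 : Int) ≤ m := le_trans (by positivity) h
  have hii : (i : Int) ≤ (i : Int) * (i : Int) := by
    rcases Nat.eq_zero_or_pos i with h0 | h0
    · subst h0; simp
    · have h1 : (1 : Int) ≤ (i : Int) := by exact_mod_cast h0
      nlinarith
  have : (i : Int) ≤ m := le_trans hii h
  omega

theorem isPrimeB_eq (m : Int) (hm : 2 ≤ m) : isPrimeB m = decide (Nat.Prime m.toNat) := by
  have hm' : ((m.toNat : Nat) : Int) = m := Int.toNat_of_nonneg (by omega)
  rw [isPrimeB, if_neg (by omega : ¬ m < 2)]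
  apply Bool.eq_iff_iff.mpr
  rw [isPrimeTrialB_spec, decide_eq_true_eq]
  constructor
  · intro h
    rw [Nat.prime_def_le_sqrt]
    refine ⟨by omega, fun k h2 hsq => ?_⟩
    intro hdvd
    have hkk : k * k ≤ m.toNat := Nat.le_sqrt.mp hsq
    have hbound : (k : Int) * (k : Int) ≤ m := by
      calc (k : Int) * (k : Int) = ((k * k : Nat) : Int) := by push_cast; ring
        _ ≤ ((m.toNat : Nat) : Int) := by exact_mod_cast hkk
        _ = m := hm'
    have hdvd' : (k : Int) ∣ m := by
      rw [← hm']
      exact_mod_cast hdvd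
    exact h k h2 hbound hdvd'
  · intro hp j h2j hjj hdvd
    have hdj : j ∣ m.toNat := by
      rw [← hm'] at hdvd
      exact_mod_cast hdvd
    have hsq : j ≤ m.toNat.sqrt := by
      apply Nat.le_sqrt.mpr
      have h1 : ((j * j : Nat) : Int) ≤ ((m.toNat : Nat) : Int) := by
        rw [hm']
        push_cast
        exact hjj
      exact_mod_cast h1
    exact (Nat.prime_def_le_sqrt.mp hp).2 j h2j hsq hdj

theorem euclid_low (n1 n2 rem : Int) (h : ¬ n2 > 1) : euclidLoopA n1 n2 rem = rem := by
  rw [euclidLoopA]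
  simp [h]

theorem euclid_gcd (n2 : Int) (h2 : 2 ≤ n2) (n1 rem : Int) :
    (euclidLoopA n1 n2 rem = 1 ↔ Int.gcd n1 n2 = 1) := by
  have hpos : (0 : Int) < n2 := by omega
  have hr0 := PySem.Int.mod_nonneg n1 hpos
  have hrlt := PySem.Int.mod_lt n1 hpos
  rw [euclidLoopA, dif_pos (by omega : n2 > 1)]
  have hgcd : Int.gcd n2 (PySem.Int.mod n1 n2) = Int.gcd n1 n2 := by
    rw [PySem.Int.mod_eq_emod_of_pos hpos, Int.emod_def, sub_eq_add_neg, ← mul_neg,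
      Int.gcd_add_mul_left_right, Int.gcd_comm]
  by_cases hr2 : 2 ≤ PySem.Int.mod n1 n2
  · rw [euclid_gcd (PySem.Int.mod n1 n2) hr2 n2 (PySem.Int.mod n1 n2), hgcd]
  · rw [euclid_low n2 (PySem.Int.mod n1 n2) (PySem.Int.mod n1 n2) (by omega), ← hgcd]
    constructor
    · intro h1
      rw [h1]
      exact Int.gcd_one_right n2
    · intro hg
      rcases (by omega : PySem.Int.mod n1 n2 = 0 ∨ PySem.Int.mod n1 n2 = 1) with h0 | h1
      · rw [h0, Int.gcd_zero_right] at hg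
        omega
      · exact h1
termination_by n2.toNat
decreasing_by omega

theorem decide_eq_beq_int (x y : Int) : decide (x = y) = (x == y) := by
  cases h : x == y
  · simp [beq_eq_false_iff_ne.mp h]
  · simp [beq_iff_eq.mp h]

theorem areRelAux_eq (flag : Bool) (n1 n2 : Int) (h : n1 ≠ n2) :
    areRelAuxA flag n1 n2
      = (flag && (euclidLoopA (max n1 n2) (min n1 n2) (max n1 n2) == 1)) := by
  rw [areRelAuxA]
  cases flag
  · simp
  · by_cases hlt : n2 > n1
    · simp [hlt, max_eq_right (le_of_lt hlt), min_eq_left (le_of_lt hlt), decide_eq_beq_int]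
    · have hgt : n1 > n2 := by omega
      simp [hlt, max_eq_left (le_of_lt hgt), min_eq_right (le_of_lt hgt), decide_eq_beq_int]

theorem main_cond (lo hi : Int) (hlh : lo < hi) (hhi0 : 0 ≤ hi) :
    (isPrimeA hi && (euclidLoopA hi lo hi == 1))
      = ((decide (2 ≤ lo) && isPrimeB hi) || ((hi == 1) && decide (lo ≤ 1))) := by
  by_cases h2lo : 2 ≤ lo
  · have hhi2 : 2 ≤ hi := by omega
    rw [isPrimeA_eq hi hhi2, isPrimeB_eq hi hhi2]
    have hne1 : (hi == 1) = false := beq_eq_false_iff_ne.mpr (by omega)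
    rw [hne1]
    simp only [Bool.false_and, Bool.or_false, decide_eq_true h2lo, Bool.true_and]
    by_cases hp : Nat.Prime hi.toNat
    · simp only [hp, decide_true, Bool.true_and]
      have hg : Int.gcd hi lo = 1 := by
        have hco : Nat.Coprime hi.toNat lo.toNat :=
          (Nat.Prime.coprime_iff_not_dvd hp).mpr (fun hdvd => by
            have := Nat.le_of_dvd (by omega) hdvd
            omega)
        have e1 : hi.natAbs = hi.toNat := by omega
        have e2 : lo.natAbs = lo.toNat := by omega
        rw [Int.gcd, e1, e2]
        exact hco
      have := (euclid_gcd lo h2lo hi hi).mpr hg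
      simp [this]
    · simp [hp]
  · rw [euclid_low hi lo hi (by omega)]
    have hd : decide (2 ≤ lo) = false := by simp; omega
    have hd2 : decide (lo ≤ 1) = true := by simp; omega
    rw [hd, hd2]
    simp only [Bool.false_and, Bool.false_or, Bool.and_true]
    by_cases hhi1 : hi = 1
    · subst hhi1
      have h1 : isPrimeA 1 = true := by decide
      rw [h1]
      simp
    · have hne1 : (hi == 1) = false := beq_eq_false_iff_ne.mpr hhi1
      rw [hne1]
      simp

theorem condA_closed (a n : Int) (hn : 0 ≤ n) (hne : a ≠ n) :
    AreRelativePrimeA a n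
      = ((decide (2 ≤ min a n) && isPrimeB (max a n))
          || ((max a n == 1) && decide (min a n ≤ 1))) := by
  rcases lt_or_gt_of_ne hne with h | h
  · have hA : AreRelativePrimeA a n = areRelAuxA (isPrimeA n) a n := by
      rw [AreRelativePrimeA, if_neg (by omega : ¬ a > n), if_pos (by omega : n > a)]
    rw [hA, areRelAux_eq _ _ _ hne, max_eq_right (le_of_lt h), min_eq_left (le_of_lt h)]
    exact main_cond a n h (by omega)
  · have hA : AreRelativePrimeA a n = areRelAuxA (isPrimeA a) a n := by
      rw [AreRelativePrimeA, if_pos (by omega : a > n)]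
    rw [hA, areRelAux_eq _ _ _ hne, max_eq_left (le_of_lt h), min_eq_right (le_of_lt h)]
    exact main_cond n a h (by omega)

theorem condA_a_eq_n (a n : Int) (h : a = n) : AreRelativePrimeA a n = true := by
  rw [AreRelativePrimeA, if_neg (by omega : ¬ a > n), if_neg (by omega : ¬ n > a)]

theorem rev_get (l : List (String × Int)) (r : PySem.Dict Int String) (c : Int) :
    (l.foldl (fun r p => if r.contains p.2 then r else r.insert p.2 p.1) r).get? c
      = ((r.get? c).or ((l.find? (fun p => p.2 == c)).map Prod.fst)) := by
  induction l generalizing r with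
  | nil => simp
  | cons p t ih =>
    rw [List.foldl_cons, ih]
    cases hpc : (p.2 == c) with
    | true =>
      have hpc' : p.2 = c := beq_iff_eq.mp hpc
      subst hpc'
      simp only [List.find?_cons, hpc]
      by_cases hcon : r.contains p.2 = true
      · rw [if_pos hcon]
        have hsome : (r.get? p.2).isSome = true := by
          rw [← PySem.Dict.contains_eq_isSome_get?]
          exact hcon
        obtain ⟨v, hv⟩ := Option.isSome_iff_exists.mp hsome
        rw [hv]
        simp
      · rw [if_neg hcon]
        have hnone : r.get? p.2 = none :=
          (PySem.Dict.get?_eq_none_iff_contains r p.2).mpr (by simpa using hcon)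
        rw [PySem.Dict.get?_insert_self, hnone]
        simp
    | false =>
      simp only [List.find?_cons, hpc]
      have hne : c ≠ p.2 := fun he => by
        rw [he] at hpc
        simp at hpc
      by_cases hcon : r.contains p.2 = true
      · rw [if_pos hcon]
      · rw [if_neg hcon, PySem.Dict.get?_insert_of_ne r p.1 hne]

theorem keys_update_subset (l : List (String × Int)) :
    ∀ (d : PySem.Dict String Int) (k : String),
      k ∈ (l.foldl (fun acc p => acc.insert p.1 p.2) d).keys →
        k ∈ d.keys ∨ ∃ p ∈ l, p.1 = k := by
  induction l with
  | nil =>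
    intro d k h
    exact Or.inl h
  | cons q t ih =>
    intro d k h
    rw [List.foldl_cons] at h
    rcases ih (d.insert q.1 q.2) k h with hk | ⟨p, hp, he⟩
    · rcases (PySem.Dict.mem_keys_insert d q.1 k q.2).mp hk with he | h'
      · exact Or.inr ⟨q, List.mem_cons_self, he.symm⟩
      · exact Or.inl h'
    · exact Or.inr ⟨p, List.mem_cons_of_mem _ hp, he⟩

theorem keys_ofList_subset (l : List (String × Int)) (k : String)
    (h : k ∈ (PySem.Dict.ofList l).keys) : ∃ p ∈ l, p.1 = k := by
  rw [PySem.Dict.ofList, PySem.Dict.update] at h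
  rcases keys_update_subset l PySem.Dict.empty k h with hk | hex
  · rw [PySem.Dict.keys_empty] at hk
    cases hk
  · exact hex

-- B's min/max at a = n
theorem minmax_self (a n : Int) (h : a = n) : min a n = a ∧ max a n = a := by
  subst h
  exact ⟨min_self a, max_self a⟩

-- ===== VERDICT (by name: the statement is the Claim_ definition above) =====
theorem EncryptCharacter_spec : Claim_unchanged_EncryptCharacter := by
  intro pc ls a b hDom hPre hD
  simp only [EncryptCharacter, EncryptCharacter_alt]
  by_cases han : a = ((PySem.Dict.ofList ls).size : Int)
  · obtain ⟨hmin, hmax⟩ := minmax_self a _ han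
    have hA := condA_a_eq_n a ((PySem.Dict.ofList ls).size : Int) han
    by_cases hp : 2 ≤ a ∧ Nat.Prime a.toNat
    · have hip : isPrimeB (max a ((PySem.Dict.ofList ls).size : Int)) = true := by
        rw [hmax, isPrimeB_eq a hp.1]
        simp [hp.2]
      have hg : (decide (min a ((PySem.Dict.ofList ls).size : Int) < 2)
          || !isPrimeB (max a ((PySem.Dict.ofList ls).size : Int))) = false := by
        rw [hip, hmin]
        simp
        omega
      simp only [hA, if_true, hg, Bool.false_eq_true, if_false]
      rw [rev_get]
      cases hf : (PySem.Dict.ofList ls).items.find?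
          (fun p => p.2 == PySem.Int.mod (a * (PySem.Dict.ofList ls).getD pc 0 + b)
            ((PySem.Dict.ofList ls).size : Int)) with
      | none => simp [hf, PySem.Dict.get?_empty, pvMsgA, pvMsgB]
      | some p => simp [hf, PySem.Dict.get?_empty]
    · have hg : (decide (min a ((PySem.Dict.ofList ls).size : Int) < 2)
          || !isPrimeB (max a ((PySem.Dict.ofList ls).size : Int))) = true := by
        rw [hmin, hmax]
        by_cases h2a : 2 ≤ a
        · have : ¬ Nat.Prime a.toNat := fun hpr => hp ⟨h2a, hpr⟩
          rw [isPrimeB_eq a h2a]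
          simp [this]
        · simp
          omega
      simp only [hA, if_true, hg, if_true]
      have hc : (PySem.Dict.ofList ls).contains pc = true := hPre.1 (Or.inl han)
      have hf : (PySem.Dict.ofList ls).items.find?
          (fun p => p.2 == PySem.Int.mod (a * (PySem.Dict.ofList ls).getD pc 0 + b)
            ((PySem.Dict.ofList ls).size : Int)) = none := by
        apply List.find?_eq_none.mpr
        intro p hpm hbeq
        apply hD
        refine ⟨hc, ?_, Or.inl ⟨han, hp⟩⟩
        rw [PySem.Dict.values]
        exact List.mem_map.mpr ⟨p, hpm, beq_iff_eq.mp hbeq⟩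
      simp [hf, pvMsgA, pvMsgB]
  · have hn0 : (0 : Int) ≤ ((PySem.Dict.ofList ls).size : Int) := by positivity
    rw [condA_closed a ((PySem.Dict.ofList ls).size : Int) hn0 han]
    by_cases hok : (decide (2 ≤ min a ((PySem.Dict.ofList ls).size : Int))
        && isPrimeB (max a ((PySem.Dict.ofList ls).size : Int))) = true
    · have hg : (decide (min a ((PySem.Dict.ofList ls).size : Int) < 2)
          || !isPrimeB (max a ((PySem.Dict.ofList ls).size : Int))) = false := by
        rcases Bool.and_eq_true_iff.mp hok with ⟨h1, h2⟩
        rw [h2]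
        simp at h1 ⊢
        omega
      simp only [hok, Bool.true_or, if_true, hg, Bool.false_eq_true, if_false]
      rw [rev_get]
      cases hf : (PySem.Dict.ofList ls).items.find?
          (fun p => p.2 == PySem.Int.mod (a * (PySem.Dict.ofList ls).getD pc 0 + b)
            ((PySem.Dict.ofList ls).size : Int)) with
      | none => simp [hf, PySem.Dict.get?_empty, pvMsgA, pvMsgB]
      | some p => simp [hf, PySem.Dict.get?_empty]
    · have hokf : (decide (2 ≤ min a ((PySem.Dict.ofList ls).size : Int))
          && isPrimeB (max a ((PySem.Dict.ofList ls).size : Int))) = false := by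
        revert hok
        cases (decide (2 ≤ min a ((PySem.Dict.ofList ls).size : Int))
          && isPrimeB (max a ((PySem.Dict.ofList ls).size : Int))) <;> simp
      have hg : (decide (min a ((PySem.Dict.ofList ls).size : Int) < 2)
          || !isPrimeB (max a ((PySem.Dict.ofList ls).size : Int))) = true := by
        cases h1 : decide (2 ≤ min a ((PySem.Dict.ofList ls).size : Int)) with
        | false =>
          simp at h1 ⊢
          omega
        | true =>
          have h2 : isPrimeB (max a ((PySem.Dict.ofList ls).size : Int)) = false := by
            cases h2 : isPrimeB (max a ((PySem.Dict.ofList ls).size : Int)) with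
            | false => rfl
            | true =>
              rw [h1, h2] at hokf
              exact absurd hokf (by simp)
          simp [h2]
      cases hex : ((max a ((PySem.Dict.ofList ls).size : Int) == 1)
          && decide (min a ((PySem.Dict.ofList ls).size : Int) ≤ 1)) with
      | false =>
        rw [hokf, hg]
        simp [pvMsgA, pvMsgB]
      | true =>
        rcases Bool.and_eq_true_iff.mp hex with ⟨he1, he2⟩
        have hmax1 : max a ((PySem.Dict.ofList ls).size : Int) = 1 := beq_iff_eq.mp he1
        have hmin1 : min a ((PySem.Dict.ofList ls).size : Int) ≤ 1 := of_decide_eq_true he2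
        have hc : (PySem.Dict.ofList ls).contains pc = true :=
          hPre.1 (Or.inr (Or.inr ⟨hmax1, hmin1⟩))
        have hf : (PySem.Dict.ofList ls).items.find?
            (fun p => p.2 == PySem.Int.mod (a * (PySem.Dict.ofList ls).getD pc 0 + b)
              ((PySem.Dict.ofList ls).size : Int)) = none := by
          apply List.find?_eq_none.mpr
          intro p hpm hbeq
          apply hD
          refine ⟨hc, ?_, Or.inr ⟨han, hmax1, hmin1⟩⟩
          rw [PySem.Dict.values]
          exact List.mem_map.mpr ⟨p, hpm, beq_iff_eq.mp hbeq⟩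
        rw [hg]
        simp [hf, pvMsgA, pvMsgB]

theorem EncryptCharacter_changed : Claim_changed_EncryptCharacter := by
  unfold Claim_changed_EncryptCharacter
  decide

theorem EncryptCharacter_tight : Claim_exact_EncryptCharacter := by
  intro pc ls a b hDom hPre hD
  obtain ⟨hc, hcv, hbr⟩ := hD
  have hn0 : (0 : Int) ≤ ((PySem.Dict.ofList ls).size : Int) := by positivity
  -- A's check is truthy on D_
  have hA : AreRelativePrimeA a ((PySem.Dict.ofList ls).size : Int) = true := by
    rcases hbr with ⟨han, _⟩ | ⟨han, hmax1, hmin1⟩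
    · exact condA_a_eq_n _ _ han
    · rw [condA_closed a _ hn0 han, hmax1]
      have : decide (min a ((PySem.Dict.ofList ls).size : Int) ≤ 1) = true := by
        simpa using hmin1
      rw [this]
      simp
  -- B refuses on D_
  have hg : (decide (min a ((PySem.Dict.ofList ls).size : Int) < 2)
      || !isPrimeB (max a ((PySem.Dict.ofList ls).size : Int))) = true := by
    rcases hbr with ⟨han, hp⟩ | ⟨_, _, hmin1⟩
    · obtain ⟨hmin, hmax⟩ := minmax_self a _ han
      rw [hmin, hmax]
      by_cases h2a : 2 ≤ a
      · have : ¬ Nat.Prime a.toNat := fun hpr => hp ⟨h2a, hpr⟩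
        rw [isPrimeB_eq a h2a]
        simp [this]
      · simp
        omega
    · have : decide (min a ((PySem.Dict.ofList ls).size : Int) < 2) = true := by
        simp
        omega
      rw [this]
      simp
  have hex : ∃ p ∈ (PySem.Dict.ofList ls).items,
      (p.2 == PySem.Int.mod (a * (PySem.Dict.ofList ls).getD pc 0 + b)
        ((PySem.Dict.ofList ls).size : Int)) = true := by
    rw [PySem.Dict.values] at hcv
    obtain ⟨p, hp, he⟩ := List.mem_map.mp hcv
    exact ⟨p, hp, beq_iff_eq.mpr he⟩
  have hsome := List.find?_isSome.mpr hex
  obtain ⟨p, hfp⟩ := Option.isSome_iff_exists.mp hsome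
  have hAval : EncryptCharacter pc ls a b = p.1 := by
    simp only [EncryptCharacter]
    simp [hA, hfp]
  have hBval : EncryptCharacter_alt pc ls a b = pvMsgB := by
    simp only [EncryptCharacter_alt]
    rw [hg]
    simp
  rw [hAval, hBval]
  have hmem : p ∈ (PySem.Dict.ofList ls).items := List.mem_of_find?_eq_some hfp
  have hk : p.1 ∈ (PySem.Dict.ofList ls).keys := by
    rw [PySem.Dict.keys]
    exact List.mem_map_of_mem hmem
  obtain ⟨q, hq, he⟩ := keys_ofList_subset ls p.1 hk
  have hne := hPre.2 q hq
  rw [he] at hne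
  simpa [pvMsgB] using hne
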